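-- pv_equiv track=rewrite | github.com/miliar/Code_Jam_Webscraper | Solutions_python/Problem_155/2655.py | solve
-- ===== SOURCE A (Python) =====
-- def solve(s):
--     a, r = 0, 0
--     for i, v in enumerate(s[:-1]):
--         a += int(v)
--         t = i + 1 - a
--         if t > 0:
--             r += t
--             a += t
--     return r
-- ===== SOURCE B (Python) =====
-- def solve(s):
--     prefix = []
--     acc = 0
--     for v in s[:-1]:
--         acc += int(v)
--         prefix.append(acc)
--     return max([0] + [i + 1 - p for i, p in enumerate(prefix)])
-- ===== Notes on version B (the rewrite author's own statement) =====
-- stated objective: simpler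
-- what changed: B replaces A's single fold with self-feedback (each shortfall added back into the running sum and count) by a staged computation: build the plain prefix-sum list of the digits, then return the maximum prefix deficit max(0, max_i(i+1-prefix[i])).
import Mathlib
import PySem

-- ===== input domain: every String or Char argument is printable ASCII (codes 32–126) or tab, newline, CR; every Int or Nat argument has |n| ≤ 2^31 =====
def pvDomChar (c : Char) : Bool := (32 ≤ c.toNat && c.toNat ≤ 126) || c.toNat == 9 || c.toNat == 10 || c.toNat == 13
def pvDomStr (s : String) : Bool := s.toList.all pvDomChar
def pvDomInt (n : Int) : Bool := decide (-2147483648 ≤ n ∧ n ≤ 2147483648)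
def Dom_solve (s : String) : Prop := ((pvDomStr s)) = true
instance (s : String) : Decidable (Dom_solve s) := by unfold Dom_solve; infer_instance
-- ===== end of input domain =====

-- B replaces A's self-feedback fold by a staged computation: plain prefix sums of the
-- digits, then the maximum prefix deficit (objective: simpler).

-- ===== PORT A =====
-- int(v) for the single char v; Pre_solve guarantees the parse succeeds (digit), so getD 0 is never taken
def pvDig (c : Char) : Int := (PySem.Int.ofChars? [c]).getD 0

def stepA (st : Int × Int) (iv : Int × Char) : Int × Int :=
  let a := st.1 + pvDig iv.2
  let t := iv.1 + 1 - a
  if t > 0 then (a + t, st.2 + t) else (a, st.2)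

def solve (s : String) : Int :=
  ((PySem.List.enumerate (PySem.List.slice s.toList none (some (-1)))).foldl stepA (0, 0)).2

-- ===== PORT B =====
-- the 'for v in s[:-1]: acc += int(v); prefix.append(acc)' loop of Source B
def prefixSums : List Char → Int → List Int
  | [], _ => []
  | c :: cs, acc => (acc + pvDig c) :: prefixSums cs (acc + pvDig c)

-- max([0] + [i + 1 - p for i, p in enumerate(prefix)])
def solve_alt (s : String) : Int :=
  ((PySem.List.enumerate (prefixSums (PySem.List.slice s.toList none (some (-1))) 0)).map
      (fun ip => ip.1 + 1 - ip.2)).foldl max 0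

-- ===== PRECONDITION & SPEC =====
-- int(v) raises ValueError unless each char of s[:-1] is a digit
def Pre_solve (s : String) : Prop := s.toList.dropLast.all Char.isDigit = true
instance (s : String) : Decidable (Pre_solve s) := by unfold Pre_solve; infer_instance
def pvWitness_solve : String := "1203"

def Spec_solve (s : String) (out : Int) : Prop := out = solve_alt s
instance (s : String) (out : Int) : Decidable (Spec_solve s out) := by unfold Spec_solve; infer_instance

-- ===== CLAIM (what is proved, stated in full; the proofs are below) =====
def Claim_equal_solve : Prop := ∀ (s : String), Dom_solve s → Pre_solve s → Spec_solve s (solve s)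

-- ===== LEMMAS AND PROOFS =====

-- Invariant: A's accumulator equals the plain prefix sum plus the count of additions so far,
-- and the count is the running maximum prefix deficit.
lemma foldAB : ∀ (cs : List Char) (k a r : Int),
    ((PySem.List.enumerate cs k).foldl stepA (a + r, r)).2
      = ((PySem.List.enumerate (prefixSums cs a) k).map
          (fun ip => ip.1 + 1 - ip.2)).foldl max r := by
  intro cs
  induction cs with
  | nil => intro k a r; simp [prefixSums]
  | cons c cs ih =>
    intro k a r
    have hA : stepA (a + r, r) (k, c)
        = ((a + pvDig c) + max r (k + 1 - (a + pvDig c)), max r (k + 1 - (a + pvDig c))) := by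
      unfold stepA
      by_cases h : k + 1 - (a + r + pvDig c) > 0
      · simp only [h, if_pos]
        have : max r (k + 1 - (a + pvDig c)) = k + 1 - (a + pvDig c) := by omega
        rw [this, Prod.mk.injEq]; constructor <;> omega
      · simp only [h, if_false]
        have : max r (k + 1 - (a + pvDig c)) = r := by omega
        rw [this, Prod.mk.injEq]; constructor <;> omega
    simp only [prefixSums, PySem.List.enumerate_cons, List.foldl_cons, List.map_cons, hA]
    exact ih (k + 1) (a + pvDig c) (max r (k + 1 - (a + pvDig c)))

-- ===== VERDICT (by name: the statement is the Claim_ definition above) =====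
theorem solve_spec : Claim_equal_solve := by
  intro s _ _
  unfold Spec_solve solve solve_alt
  have h := foldAB (PySem.List.slice s.toList none (some (-1))) 0 0 0
  simpa using h
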